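-- pv_equiv track=rewrite | github.com/wilsontelab/wilsontew-data-analysis | scripts/helpers/patch_threec_labels_and_stats.py | _patch_s7s9_cell
-- ===== SOURCE A (Python) =====
-- from typing import Any, List
--
-- def _patch_s7s9_cell(lines: List[str]) -> List[str]:
--     out: List[str] = []
--
--     helper_inserted = False
--
--     for ln in lines:
--         out.append(ln)
--
--         # After dsb_plot_levels() definition, inject helpers once.
--         if (not helper_inserted) and ln.strip() == "}":
--             # Heuristic: the first standalone '}' after dsb_plot_levels block occurs very early.
--             # Confirm previous few lines mention dsb_plot_levels.
--             prev = "".join(out[-15:])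
--             if "dsb_plot_levels <- function" in prev:
--                 out.append("\n")
--                 out.append("# Helper label formatting (avoid clutter by hiding tiny bars)\n")
--                 out.append("label_pct <- function(x, digits = 1, min_show = 1) {\n")
--                 out.append("  ifelse(is.na(x) | !is.finite(x) | x < min_show, NA_character_, paste0(round(x, digits), '%'))\n")
--                 out.append("}\n")
--                 out.append("\n")
--                 out.append("label_num <- function(x, digits = 2, min_show = 0) {\n")
--                 out.append("  ifelse(is.na(x) | !is.finite(x) | x < min_show, NA_character_, as.character(round(x, digits)))\n")
--                 out.append("}\n")
--                 out.append("\n")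
--                 out.append("lm_stats_label_df <- function(df, x_col, y_col) {\n")
--                 out.append("  d <- df %>% dplyr::filter(is.finite(.data[[x_col]]), is.finite(.data[[y_col]]))\n")
--                 out.append("  if (nrow(d) < 2) return(tibble::tibble(x = Inf, y = Inf, label = NA_character_))\n")
--                 out.append("  r <- suppressWarnings(stats::cor(d[[x_col]], d[[y_col]], method = 'pearson'))\n")
--                 out.append("  fit <- tryCatch(stats::lm(d[[y_col]] ~ d[[x_col]]), error = function(e) NULL)\n")
--                 out.append("  r2 <- if (is.null(fit)) NA_real_ else summary(fit)$r.squared\n")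
--                 out.append("  tibble::tibble(x = Inf, y = Inf, label = sprintf('r = %.3f\\nr^2 = %.3f', r, r2))\n")
--                 out.append("}\n")
--                 out.append("\n")
--                 helper_inserted = True
--
--     # Second pass: inject geom_text after geom_col calls and annotate regression plots.
--     patched: List[str] = []
--     for ln in out:
--         patched.append(ln)
--
--         if "geom_col(position = position_dodge(width = 0.9), width = 0.85" in ln:
--             # Percent contribution plots (CIS/TRANS and per-combo). Uses different y columns in different functions;
--             # we rely on mapping inside aes(y=...) so just use ..y.. via after_stat? ggplot2 doesn't support that
--             # cleanly here, so add explicit label mappings in each plot below where possible.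
--             continue
--
--         # Add lm stats labels after geom_smooth in CIS plot
--         if "geom_smooth(aes(x = Allele_Frequency, y = log2FC_CIS)" in ln:
--             patched.append("    geom_text(data = lm_stats_label_df(df_plot, 'Allele_Frequency', 'log2FC_CIS'), aes(x = x, y = y, label = label), inherit.aes = FALSE, hjust = 1.1, vjust = 1.1, size = 3.2) +\n")
--
--         if "geom_smooth(aes(x = Allele_Frequency, y = log2FC_TRANS)" in ln:
--             patched.append("    geom_text(data = lm_stats_label_df(df_plot, 'Allele_Frequency', 'log2FC_TRANS'), aes(x = x, y = y, label = label), inherit.aes = FALSE, hjust = 1.1, vjust = 1.1, size = 3.2) +\n")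
--
--     # Third pass: function-specific bar labels by matching the plot-building lines.
--     final: List[str] = []
--     for ln in patched:
--         final.append(ln)
--
--         # CIS contrib
--         if "geom_col(position = position_dodge(width = 0.9), width = 0.85, na.rm = TRUE) +" in ln:
--             # We can only safely add this in the CIS/TRANS contrib functions where the y variable is known.
--             # We'll add a generic mapping if the variable name appears in the preceding aes line.
--             continue
--
--         # Foldchange CIS bars
--         if "geom_col(width = 0.85, na.rm = TRUE, fill = '#008837') +" in ln:
--             final.append("        geom_text(aes(label = label_num(FoldChange_Cis_120_vs_0, digits = 2, min_show = 0)), vjust = -0.25, size = 2.8, color = 'grey10') +\n")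
--             final.append("        scale_y_continuous(expand = expansion(mult = c(0, 0.10))) +\n")
--
--         # Foldchange TRANS bars
--         if "geom_col(width = 0.85, na.rm = TRUE, fill = '#7b3294') +" in ln:
--             final.append("        geom_text(aes(label = label_num(FoldChange_Trans_120_vs_0, digits = 2, min_show = 0)), vjust = -0.25, size = 2.8, color = 'grey10') +\n")
--             final.append("        scale_y_continuous(expand = expansion(mult = c(0, 0.10))) +\n")
--
--         # Allele frequency bars
--         if "geom_col(position = position_dodge(width = 0.9), width = 0.85, na.rm = TRUE) +" in ln and "Allele_Frequency" in "".join(final[-8:]):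
--             final.append("        geom_text(aes(label = label_pct(100 * Allele_Frequency, digits = 1, min_show = 1)), position = position_dodge(width = 0.9), vjust = -0.25, size = 2.6, color = 'grey10') +\n")
--             final.append("        scale_y_continuous(labels = scales::percent_format(accuracy = 1), expand = expansion(mult = c(0, 0.10))) +\n")
--
--         # Percent trans by combo
--         if "geom_col(position = position_dodge(width = 0.9), width = 0.85, na.rm = TRUE) +" in ln and "Percent_Trans" in "".join(final[-8:]):
--             final.append("      geom_text(aes(label = label_pct(Percent_Trans, digits = 1, min_show = 2)), position = position_dodge(width = 0.9), vjust = -0.25, size = 2.5, color = 'grey10') +\n")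
--             final.append("      scale_y_continuous(expand = expansion(mult = c(0, 0.10))) +\n")
--
--         # CIS/TRANS contribution plots
--         if "geom_col(position = position_dodge(width = 0.9), width = 0.85, na.rm = TRUE) +" in ln and "Percent_Location_in_Cis" in "".join(final[-8:]):
--             final.append("        geom_text(aes(label = label_pct(Percent_Location_in_Cis, digits = 1, min_show = 2)), position = position_dodge(width = 0.9), vjust = -0.25, size = 2.4, color = 'grey10') +\n")
--             final.append("        scale_y_continuous(expand = expansion(mult = c(0, 0.12))) +\n")
--
--         if "geom_col(position = position_dodge(width = 0.9), width = 0.85, na.rm = TRUE) +" in ln and "Percent_Location_in_Trans" in "".join(final[-8:]):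
--             final.append("        geom_text(aes(label = label_pct(Percent_Location_in_Trans, digits = 1, min_show = 2)), position = position_dodge(width = 0.9), vjust = -0.25, size = 2.4, color = 'grey10') +\n")
--             final.append("        scale_y_continuous(expand = expansion(mult = c(0, 0.12))) +\n")
--
--     return final
-- ===== SOURCE B (Python) =====
-- from typing import List
--
-- # One merged pass over `lines`. Helper-window = last 15 original lines (identical to
-- # A's out[-15:] because no insertion can precede the single helper insertion), and the
-- # four dodge-window bar-label branches of A's third pass are unreachable (the `continue`
-- # on the same substring always fires first), so B drops them.
--
-- _HELPERS = [
--     "\n",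
--     "# Helper label formatting (avoid clutter by hiding tiny bars)\n",
--     "label_pct <- function(x, digits = 1, min_show = 1) {\n",
--     "  ifelse(is.na(x) | !is.finite(x) | x < min_show, NA_character_, paste0(round(x, digits), '%'))\n",
--     "}\n",
--     "\n",
--     "label_num <- function(x, digits = 2, min_show = 0) {\n",
--     "  ifelse(is.na(x) | !is.finite(x) | x < min_show, NA_character_, as.character(round(x, digits)))\n",
--     "}\n",
--     "\n",
--     "lm_stats_label_df <- function(df, x_col, y_col) {\n",
--     "  d <- df %>% dplyr::filter(is.finite(.data[[x_col]]), is.finite(.data[[y_col]]))\n",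
--     "  if (nrow(d) < 2) return(tibble::tibble(x = Inf, y = Inf, label = NA_character_))\n",
--     "  r <- suppressWarnings(stats::cor(d[[x_col]], d[[y_col]], method = 'pearson'))\n",
--     "  fit <- tryCatch(stats::lm(d[[y_col]] ~ d[[x_col]]), error = function(e) NULL)\n",
--     "  r2 <- if (is.null(fit)) NA_real_ else summary(fit)$r.squared\n",
--     "  tibble::tibble(x = Inf, y = Inf, label = sprintf('r = %.3f\\nr^2 = %.3f', r, r2))\n",
--     "}\n",
--     "\n",
-- ]
--
-- _COL_PART = "geom_col(position = position_dodge(width = 0.9), width = 0.85"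
-- _FULL_DODGE = "geom_col(position = position_dodge(width = 0.9), width = 0.85, na.rm = TRUE) +"
--
-- _BAR = [
--     ("geom_col(width = 0.85, na.rm = TRUE, fill = '#008837') +",
--      ["        geom_text(aes(label = label_num(FoldChange_Cis_120_vs_0, digits = 2, min_show = 0)), vjust = -0.25, size = 2.8, color = 'grey10') +\n",
--       "        scale_y_continuous(expand = expansion(mult = c(0, 0.10))) +\n"]),
--     ("geom_col(width = 0.85, na.rm = TRUE, fill = '#7b3294') +",
--      ["        geom_text(aes(label = label_num(FoldChange_Trans_120_vs_0, digits = 2, min_show = 0)), vjust = -0.25, size = 2.8, color = 'grey10') +\n",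
--       "        scale_y_continuous(expand = expansion(mult = c(0, 0.10))) +\n"]),
-- ]
--
-- _SMOOTH = [
--     ("geom_smooth(aes(x = Allele_Frequency, y = log2FC_CIS)",
--      "    geom_text(data = lm_stats_label_df(df_plot, 'Allele_Frequency', 'log2FC_CIS'), aes(x = x, y = y, label = label), inherit.aes = FALSE, hjust = 1.1, vjust = 1.1, size = 3.2) +\n"),
--     ("geom_smooth(aes(x = Allele_Frequency, y = log2FC_TRANS)",
--      "    geom_text(data = lm_stats_label_df(df_plot, 'Allele_Frequency', 'log2FC_TRANS'), aes(x = x, y = y, label = label), inherit.aes = FALSE, hjust = 1.1, vjust = 1.1, size = 3.2) +\n"),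
-- ]
--
--
-- def _patch_s7s9_cell(lines: List[str]) -> List[str]:
--     res: List[str] = []
--     helper_inserted = False
--     for i, ln in enumerate(lines):
--         res.append(ln)
--         if _FULL_DODGE not in ln:
--             for trig, ins in _BAR:
--                 if trig in ln:
--                     res.extend(ins)
--         if _COL_PART not in ln:
--             for trig, ins in _SMOOTH:
--                 if trig in ln:
--                     res.append(ins)
--         if (not helper_inserted) and ln.strip() == "}" \
--                 and "dsb_plot_levels <- function" in "".join(lines[max(0, i - 14):i + 1]):
--             res.extend(_HELPERS)
--             helper_inserted = True
--     return res
-- ===== Notes on version B (the rewrite author's own statement) =====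
-- stated objective: simpler
-- what changed: Replaces A's three sequential rewrite passes (helper injection, geom_smooth labels, bar labels) with one merged loop that emits each line together with all of its insertions in place, computing the helper lookback window directly from the original line index and dropping A's four dodge-window bar-label branches, which are unreachable behind the earlier continue on the same substring.
import Mathlib
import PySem

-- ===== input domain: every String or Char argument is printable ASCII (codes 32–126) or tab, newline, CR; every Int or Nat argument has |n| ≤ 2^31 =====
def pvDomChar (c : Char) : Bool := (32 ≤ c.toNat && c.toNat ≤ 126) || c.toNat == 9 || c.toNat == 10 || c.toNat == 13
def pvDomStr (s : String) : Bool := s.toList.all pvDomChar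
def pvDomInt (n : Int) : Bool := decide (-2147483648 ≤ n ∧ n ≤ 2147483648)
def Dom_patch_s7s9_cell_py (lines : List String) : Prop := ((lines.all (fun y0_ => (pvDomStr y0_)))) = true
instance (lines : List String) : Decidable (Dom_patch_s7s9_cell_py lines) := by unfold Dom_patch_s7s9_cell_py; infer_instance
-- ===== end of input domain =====

-- B folds A's three rewrite passes into one loop over the lines (same return value; A does not mutate its argument).

-- ===== PORT A =====
-- shared string literals of the Python source
def pvHelpers : List String :=
  [ "\n",
    "# Helper label formatting (avoid clutter by hiding tiny bars)\n",
    "label_pct <- function(x, digits = 1, min_show = 1) {\n",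
    "  ifelse(is.na(x) | !is.finite(x) | x < min_show, NA_character_, paste0(round(x, digits), '%'))\n",
    "}\n",
    "\n",
    "label_num <- function(x, digits = 2, min_show = 0) {\n",
    "  ifelse(is.na(x) | !is.finite(x) | x < min_show, NA_character_, as.character(round(x, digits)))\n",
    "}\n",
    "\n",
    "lm_stats_label_df <- function(df, x_col, y_col) {\n",
    "  d <- df %>% dplyr::filter(is.finite(.data[[x_col]]), is.finite(.data[[y_col]]))\n",
    "  if (nrow(d) < 2) return(tibble::tibble(x = Inf, y = Inf, label = NA_character_))\n",
    "  r <- suppressWarnings(stats::cor(d[[x_col]], d[[y_col]], method = 'pearson'))\n",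
    "  fit <- tryCatch(stats::lm(d[[y_col]] ~ d[[x_col]]), error = function(e) NULL)\n",
    "  r2 <- if (is.null(fit)) NA_real_ else summary(fit)$r.squared\n",
    "  tibble::tibble(x = Inf, y = Inf, label = sprintf('r = %.3f\\nr^2 = %.3f', r, r2))\n",
    "}\n",
    "\n" ]

def pvColPart : String := "geom_col(position = position_dodge(width = 0.9), width = 0.85"
def pvFullDodge : String := "geom_col(position = position_dodge(width = 0.9), width = 0.85, na.rm = TRUE) +"
def pvCis : String := "geom_smooth(aes(x = Allele_Frequency, y = log2FC_CIS)"
def pvTrans : String := "geom_smooth(aes(x = Allele_Frequency, y = log2FC_TRANS)"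
def pvCisIns : String := "    geom_text(data = lm_stats_label_df(df_plot, 'Allele_Frequency', 'log2FC_CIS'), aes(x = x, y = y, label = label), inherit.aes = FALSE, hjust = 1.1, vjust = 1.1, size = 3.2) +\n"
def pvTransIns : String := "    geom_text(data = lm_stats_label_df(df_plot, 'Allele_Frequency', 'log2FC_TRANS'), aes(x = x, y = y, label = label), inherit.aes = FALSE, hjust = 1.1, vjust = 1.1, size = 3.2) +\n"
def pvFill1 : String := "geom_col(width = 0.85, na.rm = TRUE, fill = '#008837') +"
def pvFill2 : String := "geom_col(width = 0.85, na.rm = TRUE, fill = '#7b3294') +"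
def pvBar1 : List String :=
  [ "        geom_text(aes(label = label_num(FoldChange_Cis_120_vs_0, digits = 2, min_show = 0)), vjust = -0.25, size = 2.8, color = 'grey10') +\n",
    "        scale_y_continuous(expand = expansion(mult = c(0, 0.10))) +\n" ]
def pvBar2 : List String :=
  [ "        geom_text(aes(label = label_num(FoldChange_Trans_120_vs_0, digits = 2, min_show = 0)), vjust = -0.25, size = 2.8, color = 'grey10') +\n",
    "        scale_y_continuous(expand = expansion(mult = c(0, 0.10))) +\n" ]
def pvAFIns : List String :=
  [ "        geom_text(aes(label = label_pct(100 * Allele_Frequency, digits = 1, min_show = 1)), position = position_dodge(width = 0.9), vjust = -0.25, size = 2.6, color = 'grey10') +\n",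
    "        scale_y_continuous(labels = scales::percent_format(accuracy = 1), expand = expansion(mult = c(0, 0.10))) +\n" ]
def pvPTIns : List String :=
  [ "      geom_text(aes(label = label_pct(Percent_Trans, digits = 1, min_show = 2)), position = position_dodge(width = 0.9), vjust = -0.25, size = 2.5, color = 'grey10') +\n",
    "      scale_y_continuous(expand = expansion(mult = c(0, 0.10))) +\n" ]
def pvPLCIns : List String :=
  [ "        geom_text(aes(label = label_pct(Percent_Location_in_Cis, digits = 1, min_show = 2)), position = position_dodge(width = 0.9), vjust = -0.25, size = 2.4, color = 'grey10') +\n",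
    "        scale_y_continuous(expand = expansion(mult = c(0, 0.12))) +\n" ]
def pvPLTIns : List String :=
  [ "        geom_text(aes(label = label_pct(Percent_Location_in_Trans, digits = 1, min_show = 2)), position = position_dodge(width = 0.9), vjust = -0.25, size = 2.4, color = 'grey10') +\n",
    "        scale_y_continuous(expand = expansion(mult = c(0, 0.12))) +\n" ]

-- first pass: append each line; after the first standalone '}' whose 15-line lookback mentions
-- dsb_plot_levels, append the helper block once (state = (out, helper_inserted))
def pass1Step (st : List String × Bool) (ln : String) : List String × Bool :=
  let out := st.1 ++ [ln]
  if (!st.2) && (PySem.Str.strip ln == "}") then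
    let prev := PySem.Str.join "" (PySem.List.slice out (some (-15)) none)
    if PySem.Str.isIn "dsb_plot_levels <- function" prev then (out ++ pvHelpers, true)
    else (out, st.2)
  else (out, st.2)

-- second pass: geom_smooth label insertions ('continue' = skip the rest of the body)
def pass2Step (acc : List String) (ln : String) : List String :=
  let acc1 := acc ++ [ln]
  if PySem.Str.isIn pvColPart ln then acc1
  else
    let acc2 := if PySem.Str.isIn pvCis ln then acc1 ++ [pvCisIns] else acc1
    if PySem.Str.isIn pvTrans ln then acc2 ++ [pvTransIns] else acc2

-- third pass: bar labels; the first check 'continue's on the full dodge substring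
def pass3Step (acc : List String) (ln : String) : List String :=
  let acc1 := acc ++ [ln]
  if PySem.Str.isIn pvFullDodge ln then acc1
  else
    let acc2 := if PySem.Str.isIn pvFill1 ln then acc1 ++ pvBar1 else acc1
    let acc3 := if PySem.Str.isIn pvFill2 ln then acc2 ++ pvBar2 else acc2
    let acc4 := if PySem.Str.isIn pvFullDodge ln &&
        PySem.Str.isIn "Allele_Frequency" (PySem.Str.join "" (PySem.List.slice acc3 (some (-8)) none))
      then acc3 ++ pvAFIns else acc3
    let acc5 := if PySem.Str.isIn pvFullDodge ln &&
        PySem.Str.isIn "Percent_Trans" (PySem.Str.join "" (PySem.List.slice acc4 (some (-8)) none))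
      then acc4 ++ pvPTIns else acc4
    let acc6 := if PySem.Str.isIn pvFullDodge ln &&
        PySem.Str.isIn "Percent_Location_in_Cis" (PySem.Str.join "" (PySem.List.slice acc5 (some (-8)) none))
      then acc5 ++ pvPLCIns else acc5
    if PySem.Str.isIn pvFullDodge ln &&
        PySem.Str.isIn "Percent_Location_in_Trans" (PySem.Str.join "" (PySem.List.slice acc6 (some (-8)) none))
      then acc6 ++ pvPLTIns else acc6

def patch_s7s9_cell_py (lines : List String) : List String :=
  let out := (lines.foldl pass1Step ([], false)).1
  let patched := out.foldl pass2Step []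
  patched.foldl pass3Step []

-- ===== PORT B =====
def pvBarPairs : List (String × List String) := [(pvFill1, pvBar1), (pvFill2, pvBar2)]
def pvSmoothPairs : List (String × String) := [(pvCis, pvCisIns), (pvTrans, pvTransIns)]

-- single merged pass: per line, bar labels, then smooth labels, then the one-shot helper block,
-- whose lookback window is taken from the original lines by index
def altStep (lines : List String) (st : List String × Bool) (p : Int × String) : List String × Bool :=
  let i := p.1
  let ln := p.2
  let res1 := st.1 ++ [ln]
  let res2 := if !(PySem.Str.isIn pvFullDodge ln) then
      pvBarPairs.foldl (fun r tp => if PySem.Str.isIn tp.1 ln then r ++ tp.2 else r) res1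
    else res1
  let res3 := if !(PySem.Str.isIn pvColPart ln) then
      pvSmoothPairs.foldl (fun r tp => if PySem.Str.isIn tp.1 ln then r ++ [tp.2] else r) res2
    else res2
  if (!st.2) && (PySem.Str.strip ln == "}") &&
      PySem.Str.isIn "dsb_plot_levels <- function"
        (PySem.Str.join "" (PySem.List.slice lines (some (max 0 (i - 14))) (some (i + 1)))) then
    (res3 ++ pvHelpers, true)
  else (res3, st.2)

def patch_s7s9_cell_py_alt (lines : List String) : List String :=
  ((PySem.List.enumerate lines 0).foldl (altStep lines) ([], false)).1

-- ===== CLAIM (what is proved, stated in full; the proofs are below) =====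


-- ===== LEMMAS AND PROOFS =====

-- per-line insertions of passes 2 and 3, and their fused form g

-- ===== PRECONDITION & SPEC =====
def Spec_patch_s7s9_cell_py (lines : List String) (out : List String) : Prop := out = patch_s7s9_cell_py_alt lines
instance (lines : List String) (out : List String) : Decidable (Spec_patch_s7s9_cell_py lines out) := by unfold Spec_patch_s7s9_cell_py; infer_instance

-- ===== CLAIM (what is proved, stated in full; the proofs are below) =====
def Claim_equal_patch_s7s9_cell_py : Prop := ∀ (lines : List String), Dom_patch_s7s9_cell_py lines → Spec_patch_s7s9_cell_py lines (patch_s7s9_cell_py lines)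

-- ===== LEMMAS AND PROOFS =====
def p2ins (ln : String) : List String :=
  if PySem.Str.isIn pvColPart ln then []
  else (if PySem.Str.isIn pvCis ln then [pvCisIns] else []) ++
       (if PySem.Str.isIn pvTrans ln then [pvTransIns] else [])

def p3ins (ln : String) : List String :=
  if PySem.Str.isIn pvFullDodge ln then []
  else (if PySem.Str.isIn pvFill1 ln then pvBar1 else []) ++
       (if PySem.Str.isIn pvFill2 ln then pvBar2 else [])

def f2 (ln : String) : List String := ln :: p2ins ln
def f3 (ln : String) : List String := ln :: p3ins ln
def gfun (ln : String) : List String := ln :: (p3ins ln ++ p2ins ln)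

lemma pass3_eq_flatMap (l : List String) : ∀ acc, l.foldl pass3Step acc = acc ++ l.flatMap f3 := by
  induction l with
  | nil => intro acc; simp
  | cons ln rest ih =>
    intro acc
    simp only [List.foldl_cons, List.flatMap_cons, ih]
    unfold pass3Step f3 p3ins
    by_cases h : PySem.Chars.isIn pvFullDodge.toList ln.toList
    · simp [h]
    · simp [h]
      split_ifs <;> simp

set_option maxRecDepth 40000 in
lemma helpers_inert : pvHelpers.flatMap gfun = pvHelpers := by decide

lemma pass2_eq_flatMap (l : List String) : ∀ acc, l.foldl pass2Step acc = acc ++ l.flatMap f2 := by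
  induction l with
  | nil => intro acc; simp
  | cons ln rest ih =>
    intro acc
    simp only [List.foldl_cons, List.flatMap_cons, ih]
    unfold pass2Step f2 p2ins
    by_cases h : PySem.Chars.isIn pvColPart.toList ln.toList
    · simp [h]
    · simp [h]
      split_ifs <;> simp

set_option maxRecDepth 40000 in
lemma p2lines_inert : p3ins pvCisIns = [] ∧ p3ins pvTransIns = [] := by decide

lemma flatMap_f3_f2 (ln : String) : (f2 ln).flatMap f3 = gfun ln := by
  unfold f2 gfun
  simp only [List.flatMap_cons]
  have h2 : (p2ins ln).flatMap f3 = p2ins ln := by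
    unfold p2ins
    split_ifs <;> simp [f3, p2lines_inert.1, p2lines_inert.2]
  rw [h2]; rfl

lemma pass1_true (suf : List String) : ∀ out, suf.foldl pass1Step (out, true) = (out ++ suf, true) := by
  induction suf with
  | nil => intro out; simp
  | cons ln rest ih => intro out; simp [pass1Step, ih]

-- B's per-line body appends gfun ln
lemma altStep_eq (lines : List String) (st : List String × Bool) (p : Int × String) :
    altStep lines st p =
      (if (!st.2) && (PySem.Str.strip p.2 == "}") &&
          PySem.Str.isIn "dsb_plot_levels <- function"
            (PySem.Str.join "" (PySem.List.slice lines (some (max 0 (p.1 - 14))) (some (p.1 + 1)))) then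
        (st.1 ++ gfun p.2 ++ pvHelpers, true)
      else (st.1 ++ gfun p.2, st.2)) := by
  unfold altStep gfun p3ins p2ins pvBarPairs pvSmoothPairs
  split_ifs <;> simp_all

lemma pass1Step_eq (st : List String × Bool) (ln : String) :
    pass1Step st ln =
      (if (!st.2) && (PySem.Str.strip ln == "}") &&
          PySem.Str.isIn "dsb_plot_levels <- function"
            (PySem.Str.join "" (PySem.List.slice (st.1 ++ [ln]) (some (-15)) none)) then
        (st.1 ++ [ln] ++ pvHelpers, true)
      else (st.1 ++ [ln], st.2)) := by
  unfold pass1Step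
  split_ifs <;> simp_all

lemma alt_true (lines : List String) (suf : List String) : ∀ (i : Int) (res : List String),
    ((PySem.List.enumerate suf i).foldl (altStep lines) (res, true)) = (res ++ suf.flatMap gfun, true) := by
  induction suf with
  | nil => intro i res; simp [PySem.List.enumerate_nil]
  | cons ln rest ih =>
    intro i res
    rw [PySem.List.enumerate_cons, List.foldl_cons, altStep_eq]
    simp only [Bool.not_true, Bool.false_and]
    rw [if_neg (by decide), ih]
    simp

def specRun (pre suf : List String) : List String :=
  match suf with
  | [] => []
  | ln :: rest =>
    if (PySem.Str.strip ln == "}") &&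
        PySem.Str.isIn "dsb_plot_levels <- function"
          (PySem.Str.join "" (PySem.List.slice (pre ++ [ln]) (some (-15)) none)) then
      gfun ln ++ pvHelpers ++ rest.flatMap gfun
    else gfun ln ++ specRun (pre ++ [ln]) rest

lemma A_spec (suf : List String) : ∀ pre,
    ((suf.foldl pass1Step (pre, false)).1).flatMap gfun = pre.flatMap gfun ++ specRun pre suf := by
  induction suf with
  | nil => intro pre; simp [specRun]
  | cons ln rest ih =>
    intro pre
    rw [List.foldl_cons, pass1Step_eq]
    simp only [Bool.not_false, Bool.true_and, specRun]
    by_cases h : ((PySem.Str.strip ln == "}") &&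
        PySem.Str.isIn "dsb_plot_levels <- function"
          (PySem.Str.join "" (PySem.List.slice (pre ++ [ln]) (some (-15)) none))) = true
    · rw [if_pos h, if_pos h, pass1_true]
      simp [helpers_inert]
    · rw [if_neg h, if_neg h, ih (pre ++ [ln])]
      simp

lemma window_eq (pre : List String) (ln : String) (rest : List String) :
    PySem.List.slice (pre ++ ln :: rest) (some (max 0 ((pre.length : Int) - 14))) (some ((pre.length : Int) + 1))
      = PySem.List.slice (pre ++ [ln]) (some (-15)) none := by
  rw [PySem.List.slice_from_neg_ofNat (pre ++ [ln]) 15 (by omega)]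
  have htake : (pre ++ ln :: rest).take (pre.length + 1) = pre ++ [ln] := by
    rw [List.take_append]
    simp
  rcases le_or_gt pre.length 13 with hn | hn
  · have h0 : max 0 ((pre.length : Int) - 14) = ((0 : Nat) : Int) := by omega
    have h1 : (pre.length : Int) + 1 = ((pre.length + 1 : Nat) : Int) := by push_cast; ring
    rw [h0, h1, PySem.List.slice_natCast]
    simp only [Nat.sub_zero, List.drop_zero, htake]
    rw [show (pre ++ [ln]).length - 15 = 0 by simp only [List.length_append, List.length_cons, List.length_nil]; omega, List.drop_zero]
  · have h0 : max 0 ((pre.length : Int) - 14) = ((pre.length - 14 : Nat) : Int) := by omega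
    have h1 : (pre.length : Int) + 1 = ((pre.length + 1 : Nat) : Int) := by push_cast; ring
    rw [h0, h1, PySem.List.slice_natCast]
    have : (pre ++ [ln]).length - 15 = pre.length - 14 := by simp only [List.length_append, List.length_cons, List.length_nil]; omega
    rw [this, ← htake, List.drop_take]

lemma B_spec (lines : List String) (suf : List String) : ∀ (pre res : List String),
    lines = pre ++ suf →
    ((PySem.List.enumerate suf (pre.length : Int)).foldl (altStep lines) (res, false)).1
      = res ++ specRun pre suf := by
  induction suf with
  | nil => intro pre res _; simp [PySem.List.enumerate_nil, specRun]
  | cons ln rest ih =>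
    intro pre res hl
    rw [PySem.List.enumerate_cons, List.foldl_cons, altStep_eq]
    have hw : PySem.List.slice lines (some (max 0 ((pre.length : Int) - 14))) (some ((pre.length : Int) + 1))
        = PySem.List.slice (pre ++ [ln]) (some (-15)) none := by
      rw [hl]; exact window_eq pre ln rest
    simp only [Bool.not_false, Bool.true_and, specRun, hw]
    by_cases h : ((PySem.Str.strip ln == "}") &&
        PySem.Str.isIn "dsb_plot_levels <- function"
          (PySem.Str.join "" (PySem.List.slice (pre ++ [ln]) (some (-15)) none))) = true
    · rw [if_pos h, if_pos h, alt_true]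
      simp
    · rw [if_neg h, if_neg h]
      have hrec := ih (pre ++ [ln]) (res ++ gfun ln) (by rw [hl]; simp)
      have hidx : ((pre ++ [ln]).length : Int) = (pre.length : Int) + 1 := by simp
      rw [hidx] at hrec
      rw [hrec]
      simp


-- ===== VERDICT (by name: the statement is the Claim_ definition above) =====
theorem patch_s7s9_cell_py_spec : Claim_equal_patch_s7s9_cell_py := by
  intro lines _
  unfold Spec_patch_s7s9_cell_py
  show (((lines.foldl pass1Step ([], false)).1.foldl pass2Step []).foldl pass3Step [])
      = ((PySem.List.enumerate lines 0).foldl (altStep lines) ([], false)).1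
  rw [pass2_eq_flatMap, pass3_eq_flatMap]
  simp only [List.nil_append, List.flatMap_assoc]
  simp only [funext flatMap_f3_f2]
  have hA := A_spec lines []
  simp only [List.flatMap_nil, List.nil_append] at hA
  have hB := B_spec lines lines [] [] rfl
  simp only [List.length_nil, Nat.cast_zero, List.nil_append] at hB
  rw [hA, ← hB]
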